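-- pv_equiv track=rewrite | github.com/AHNR0/DeepImpact | data-prep/crop_dataset.py | id_to_string
-- ===== SOURCE A (Python) =====
-- def id_to_string(idxs,map_size):
--     zones=range(map_size[0]*map_size[1])
--     strings=[]
--     for zone in zones:
--         string=''
--         for i, ID in enumerate(idxs):
--             if ID == zone:
--                 string += str(i)
--         strings.append(string)
--     return(strings)
-- ===== SOURCE B (Python) =====
-- def id_to_string(idxs, map_size):
--     n = map_size[0] * map_size[1]
--     strings = [''] * max(n, 0)
--     for i, ID in enumerate(idxs):
--         if 0 <= ID < n:
--             strings[ID] += str(i)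
--     return strings
-- ===== Notes on version B (the rewrite author's own statement) =====
-- stated objective: faster
-- what changed: Replace the per-zone scan of idxs (one full pass over idxs for every zone) by a single pass over idxs that appends str(i) into a preallocated bucket strings[ID] when 0 <= ID < n.
import Mathlib
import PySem

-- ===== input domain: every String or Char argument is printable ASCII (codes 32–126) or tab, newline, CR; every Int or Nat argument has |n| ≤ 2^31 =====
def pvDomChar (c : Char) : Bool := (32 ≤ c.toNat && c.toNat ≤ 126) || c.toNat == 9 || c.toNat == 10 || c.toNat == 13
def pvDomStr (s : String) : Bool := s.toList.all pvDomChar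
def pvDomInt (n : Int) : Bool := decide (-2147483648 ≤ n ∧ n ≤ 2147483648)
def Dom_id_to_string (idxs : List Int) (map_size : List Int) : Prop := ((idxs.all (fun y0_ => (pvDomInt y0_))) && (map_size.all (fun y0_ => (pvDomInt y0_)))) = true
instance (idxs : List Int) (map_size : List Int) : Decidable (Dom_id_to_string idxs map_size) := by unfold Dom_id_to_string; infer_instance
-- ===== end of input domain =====

-- B replaces A's per-zone rescans of idxs by one pass over idxs into preallocated buckets (asymptotically faster).

-- ===== PORT A =====
def id_to_string (idxs : List Int) (map_size : List Int) : List String :=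
  (PySem.List.pyRange 0 (PySem.List.pyGetD map_size 0 0 * PySem.List.pyGetD map_size 1 0) 1).foldl
    (fun strings zone =>
      strings ++ [(PySem.List.enumerate idxs 0).foldl
        (fun string p => if p.2 = zone then string ++ PySem.Int.toStr p.1 else string) ""])
    []

-- ===== PORT B =====
-- strings[ID] += str(i) is ported as List.set / getElem!; exact since B only assigns with 0 ≤ ID < len(strings)
def id_to_string_alt (idxs : List Int) (map_size : List Int) : List String :=
  let n := PySem.List.pyGetD map_size 0 0 * PySem.List.pyGetD map_size 1 0
  (PySem.List.enumerate idxs 0).foldl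
    (fun (strings : List String) (p : Int × Int) =>
      if 0 ≤ p.2 ∧ p.2 < n then
        strings.set p.2.toNat (strings[p.2.toNat]! ++ PySem.Int.toStr p.1)
      else strings)
    (List.replicate (max n 0).toNat "")

-- ===== PRECONDITION & SPEC =====
-- Both A and B raise IndexError when map_size has fewer than two entries; Pre_ excludes exactly those inputs.
def Pre_id_to_string (idxs : List Int) (map_size : List Int) : Prop := 2 ≤ map_size.length
instance (idxs : List Int) (map_size : List Int) : Decidable (Pre_id_to_string idxs map_size) := by unfold Pre_id_to_string; infer_instance
def pvWitness_id_to_string : List Int × List Int := ([0, 1, 1, -3, 5], [2, 2])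

def Spec_id_to_string (idxs : List Int) (map_size : List Int) (out : List String) : Prop := out = id_to_string_alt idxs map_size
instance (idxs : List Int) (map_size : List Int) (out : List String) : Decidable (Spec_id_to_string idxs map_size out) := by unfold Spec_id_to_string; infer_instance

-- ===== CLAIM (what is proved, stated in full; the proofs are below) =====
def Claim_equal_id_to_string : Prop := ∀ (idxs : List Int) (map_size : List Int), Dom_id_to_string idxs map_size → Pre_id_to_string idxs map_size → Spec_id_to_string idxs map_size (id_to_string idxs map_size)

-- ===== LEMMAS AND PROOFS =====

-- the string A builds for one zone z
def pvZone (z : Int) (xs : List (Int × Int)) : String :=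
  xs.foldl (fun string p => if p.2 = z then string ++ PySem.Int.toStr p.1 else string) ""

theorem pvZone_acc (z : Int) (xs : List (Int × Int)) (s : String) :
    xs.foldl (fun string p => if p.2 = z then string ++ PySem.Int.toStr p.1 else string) s
      = s ++ pvZone z xs := by
  induction xs generalizing s with
  | nil => simp [pvZone]
  | cons p xs ih =>
    simp only [pvZone, List.foldl_cons]
    rw [ih, ih]
    by_cases h : p.2 = z <;> simp [h, String.append_assoc]

theorem pvA_eq (idxs map_size : List Int) :
    id_to_string idxs map_size
      = (PySem.List.pyRange 0 (PySem.List.pyGetD map_size 0 0 * PySem.List.pyGetD map_size 1 0) 1).map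
          (fun z => pvZone z (PySem.List.enumerate idxs 0)) := by
  simp only [id_to_string, pvZone,
    PySem.List.foldl_append_singleton_eq_map, List.nil_append]

theorem pv_getElem!_set (strings : List String) (i k : Nat) (v : String)
    (hk : k < strings.length) :
    (strings.set i v)[k]! = if i = k then v else strings[k]! := by
  rw [getElem!_pos _ k (by simpa using hk), List.getElem_set]
  split_ifs with he
  · rfl
  · rw [getElem!_pos _ k hk]

-- one pass of B over xs: invariant on length and on each bucket
theorem pvB_inv (n : Int) (xs : List (Int × Int)) :
    ∀ (strings : List String), strings.length = (max n 0).toNat →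
      (xs.foldl
        (fun (strings : List String) (p : Int × Int) =>
          if 0 ≤ p.2 ∧ p.2 < n then
            strings.set p.2.toNat (strings[p.2.toNat]! ++ PySem.Int.toStr p.1)
          else strings) strings).length = strings.length ∧
      ∀ k, k < strings.length →
        (xs.foldl
          (fun (strings : List String) (p : Int × Int) =>
            if 0 ≤ p.2 ∧ p.2 < n then
              strings.set p.2.toNat (strings[p.2.toNat]! ++ PySem.Int.toStr p.1)
            else strings) strings)[k]! = strings[k]! ++ pvZone (k : Int) xs := by
  induction xs with
  | nil =>
    intro strings _
    exact ⟨rfl, fun k hk => by simp [pvZone]⟩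
  | cons p xs ih =>
    intro strings hlen
    by_cases h : 0 ≤ p.2 ∧ p.2 < n
    · have hlt : p.2.toNat < strings.length := by omega
      have hlen' : (strings.set p.2.toNat (strings[p.2.toNat]! ++ PySem.Int.toStr p.1)).length
          = (max n 0).toNat := by simpa using hlen
      obtain ⟨ihlen, ihel⟩ := ih _ hlen'
      constructor
      · simp only [List.foldl_cons, if_pos h]
        simpa using ihlen
      · intro k hk
        have hk' : k < (strings.set p.2.toNat (strings[p.2.toNat]! ++ PySem.Int.toStr p.1)).length := by
          simpa using hk
        simp only [List.foldl_cons, if_pos h]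
        rw [ihel k hk', pv_getElem!_set _ _ _ _ hk]
        by_cases he : p.2 = (k : Int)
        · have ht : p.2.toNat = k := by omega
          have hz : pvZone (k : Int) ((p.1, p.2) :: xs) = PySem.Int.toStr p.1 ++ pvZone (k : Int) xs := by
            simp only [pvZone, List.foldl_cons, if_pos he, String.empty_append]
            rw [pvZone_acc]
            rfl
          rw [if_pos ht, hz, ← String.append_assoc, ht]
        · have ht : p.2.toNat ≠ k := by omega
          have hz : pvZone (k : Int) ((p.1, p.2) :: xs) = pvZone (k : Int) xs := by
            simp only [pvZone, List.foldl_cons, if_neg he]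
          rw [if_neg ht, hz]
    · obtain ⟨ihlen, ihel⟩ := ih strings hlen
      constructor
      · simpa [List.foldl_cons, if_neg h] using ihlen
      · intro k hk
        have hnk : ¬ p.2 = (k : Int) := by
          rw [hlen] at hk
          omega
        simp only [List.foldl_cons, if_neg h]
        rw [ihel k hk]
        simp only [pvZone, List.foldl_cons, if_neg hnk]

theorem pv_main (idxs : List Int) (n : Int) :
    (PySem.List.pyRange 0 n 1).map (fun z => pvZone z (PySem.List.enumerate idxs 0))
      = (PySem.List.enumerate idxs 0).foldl
          (fun (strings : List String) (p : Int × Int) =>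
            if 0 ≤ p.2 ∧ p.2 < n then
              strings.set p.2.toNat (strings[p.2.toNat]! ++ PySem.Int.toStr p.1)
            else strings)
          (List.replicate (max n 0).toNat "") := by
  have hrep : (List.replicate (max n 0).toNat ("" : String)).length = (max n 0).toNat := by simp
  obtain ⟨hlen, hel⟩ := pvB_inv n (PySem.List.enumerate idxs 0) _ hrep
  apply List.ext_getElem
  · rw [List.length_map, PySem.List.length_pyRange_one, hlen, hrep]
    omega
  · intro k h1 h2
    have hk : k < (max n 0).toNat := by
      rw [List.length_map, PySem.List.length_pyRange_one] at h1
      omega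
    conv_rhs => rw [← getElem!_pos _ k h2]
    rw [hel k (by simpa using hk)]
    have hr : (List.replicate (max n 0).toNat ("" : String))[k]! = "" := by
      rw [getElem!_pos _ k (by simpa using hk)]
      simp
    rw [hr, String.empty_append]
    simp [PySem.List.getElem_pyRange_one]

-- ===== VERDICT (by name: the statement is the Claim_ definition above) =====
theorem id_to_string_spec : Claim_equal_id_to_string := by
  intro idxs map_size _ _
  unfold Spec_id_to_string
  rw [pvA_eq]
  simp only [id_to_string_alt]
  exact pv_main idxs _
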